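-- pv_equiv track=rewrite | github.com/feiYang2008/AI-for-NLP | ChatBot.py | pat_match
-- ===== SOURCE A (Python) =====
-- def is_variable(pat):
--     """
--     @pat: `string` string that could be a variable
--     @return: 'bool', whether the input string is a variable
--     """
--     return pat.startswith('?') and all(s.isalpha() for s in pat[1:])
--
-- def pat_match(pattern, saying):
--     """
--     modified `pattern match` function for multiple variables
--     @pattern: `List(`string`)`, pattern string that contain variables
--     @saying: `List(`string`)`, saying string that contain matched words
--     @return: `List(tuple('string'))`, tuples that contain pair of variable and matched word
--     """
--     if not pattern or not saying: return []
--
--     if is_variable(pattern[0]):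
--         return [(pattern[0], saying[0])] + pat_match(pattern[1:], saying[1:])
--     else:
--         if pattern[0] != saying[0]: return []
--         else:
--             return pat_match(pattern[1:], saying[1:])
-- ===== SOURCE B (Python) =====
-- def is_variable(pat):
--     return pat.startswith('?') and all(s.isalpha() for s in pat[1:])
--
-- def pat_match(pattern, saying):
--     result = []
--     for p, w in zip(pattern, saying):
--         if is_variable(p):
--             result.append((p, w))
--         elif p != w:
--             break
--     return result
-- ===== Notes on version B (the rewrite author's own statement) =====
-- stated objective: faster
-- what changed: Replaces the list-slicing recursion (each call copies pattern[1:] and saying[1:]) by a single iterative pass over zip(pattern, saying) with an accumulator and an early break.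
import Mathlib
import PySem

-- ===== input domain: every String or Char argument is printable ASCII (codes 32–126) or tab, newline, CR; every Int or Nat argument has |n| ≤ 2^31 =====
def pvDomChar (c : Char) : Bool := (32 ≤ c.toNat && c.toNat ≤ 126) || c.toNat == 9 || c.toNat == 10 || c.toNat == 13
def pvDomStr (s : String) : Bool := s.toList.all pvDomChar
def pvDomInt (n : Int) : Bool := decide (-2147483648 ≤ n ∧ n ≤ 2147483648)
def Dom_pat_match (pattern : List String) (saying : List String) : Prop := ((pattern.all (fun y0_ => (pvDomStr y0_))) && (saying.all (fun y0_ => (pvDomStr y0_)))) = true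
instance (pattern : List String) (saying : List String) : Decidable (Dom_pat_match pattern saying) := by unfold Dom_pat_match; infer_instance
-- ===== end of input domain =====

-- B replaces A's list-slicing recursion by one iterative pass over zip(pattern, saying) with an accumulator (objective: faster, asymptotic).


-- ===== PORT A =====
-- is_variable: pat.startswith('?') and all(s.isalpha() for s in pat[1:])
def is_variable (pat : String) : Bool :=
  PySem.Chars.startswith pat.toList "?".toList &&
    (PySem.Chars.slice pat.toList (some 1) none).all PySem.Chars.isalpha

-- A: recursion with pattern[1:], saying[1:]; empty checks first
def pat_match (pattern : List String) (saying : List String) : List (String × String) :=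
  match pattern, saying with
  | [], _ => []
  | _, [] => []
  | p :: ps, w :: ws =>
      if is_variable p then (p, w) :: pat_match ps ws
      else if p ≠ w then []
      else pat_match ps ws

-- ===== PORT B =====
-- the for-loop over zip with append / break, as tail recursion on the zipped list with the accumulator `result`
def pat_match_loop (result : List (String × String)) : List (String × String) → List (String × String)
  | [] => result
  | (p, w) :: rest =>
      if is_variable p then pat_match_loop (result ++ [(p, w)]) rest
      else if p ≠ w then result
      else pat_match_loop result rest

def pat_match_alt (pattern : List String) (saying : List String) : List (String × String) :=
  pat_match_loop [] (List.zip pattern saying)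

-- ===== PRECONDITION & SPEC =====
def Spec_pat_match (pattern : List String) (saying : List String) (out : List (String × String)) : Prop := out = pat_match_alt pattern saying
instance (pattern : List String) (saying : List String) (out : List (String × String)) : Decidable (Spec_pat_match pattern saying out) := by unfold Spec_pat_match; infer_instance

-- ===== CLAIM (what is proved, stated in full; the proofs are below) =====
def Claim_equal_pat_match : Prop := ∀ (pattern : List String) (saying : List String), Dom_pat_match pattern saying → Spec_pat_match pattern saying (pat_match pattern saying)

-- ===== LEMMAS AND PROOFS =====
theorem pat_match_loop_eq (ps ws : List String) (acc : List (String × String)) :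
    pat_match_loop acc (List.zip ps ws) = acc ++ pat_match ps ws := by
  induction ps generalizing ws acc with
  | nil => simp [pat_match_loop, pat_match]
  | cons p ps ih =>
    cases ws with
    | nil => simp [pat_match_loop, pat_match]
    | cons w ws =>
      simp only [List.zip_cons_cons, pat_match_loop, pat_match]
      split_ifs with h1 h2
      · rw [ih]; simp
      · simp
      · exact ih ws acc

-- ===== VERDICT (by name: the statement is the Claim_ definition above) =====
theorem pat_match_spec : Claim_equal_pat_match := by
  intro pattern saying _
  unfold Spec_pat_match pat_match_alt
  rw [pat_match_loop_eq]
  simp
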